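-- pv_equiv track=rewrite | github.com/GSK-123/1305_Final | duplicate_array.py | duplicate_array
-- ===== SOURCE A (Python) =====
-- def duplicate_array(x):
--     count = {}
--     for i in x:
--         if i in count:
--             count[i] += 1
--         else:
--             count[i] = 1
--     dup_arr = [i for i, j in count.items() if j > 1]
--
--     if dup_arr:
--         return min(dup_arr)
--     else:
--         return None
-- ===== SOURCE B (Python) =====
-- def duplicate_array(x):
--     seen = set()
--     best = None
--     for i in x:
--         if i in seen:
--             if best is None or i < best:
--                 best = i
--         else:
--             seen.add(i)
--     return best
-- ===== Notes on version B (the rewrite author's own statement) =====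
-- stated objective: simpler
-- what changed: Replaces the three-pass count-dict build / filter-to-list / min() pipeline with a single pass keeping a seen-set and a running minimum of duplicates.
import Mathlib
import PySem

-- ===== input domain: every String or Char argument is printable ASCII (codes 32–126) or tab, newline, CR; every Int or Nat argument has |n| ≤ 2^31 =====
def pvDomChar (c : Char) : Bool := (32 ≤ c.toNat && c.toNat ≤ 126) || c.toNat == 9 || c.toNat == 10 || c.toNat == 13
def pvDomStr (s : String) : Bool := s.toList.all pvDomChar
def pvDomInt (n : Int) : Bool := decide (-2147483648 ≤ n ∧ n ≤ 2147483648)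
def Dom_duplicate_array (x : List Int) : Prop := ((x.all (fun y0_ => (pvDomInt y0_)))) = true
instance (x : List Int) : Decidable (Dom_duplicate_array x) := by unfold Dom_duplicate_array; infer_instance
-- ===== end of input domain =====

-- B replaces A's count-dict / filter / min() pipeline by one pass with a seen-set and a running minimum (objective: simpler).

-- ===== PORT A =====
def duplicate_array (x : List Int) : Option Int :=
  let count := x.foldl
    (fun d i => if d.contains i then d.modify i 0 (· + 1) else d.insert i 1)
    (PySem.Dict.empty : PySem.Dict Int Int)
  let dup_arr := (count.items.filter (fun p => p.2 > 1)).map Prod.fst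
  if dup_arr.isEmpty then none else PySem.List.min? dup_arr (fun v => v)

-- ===== PORT B =====
def duplicate_array_alt (x : List Int) : Option Int :=
  (x.foldl
    (fun st i =>
      if PySem.Set.contains st.1 i then
        (st.1, match st.2 with
               | none => some i
               | some b => if i < b then some i else some b)
      else (PySem.Set.add st.1 i, st.2))
    ((PySem.Set.empty : PySem.Set Int), (none : Option Int))).2

-- ===== PRECONDITION & SPEC =====
def Spec_duplicate_array (x : List Int) (out : Option Int) : Prop := out = duplicate_array_alt x
instance (x : List Int) (out : Option Int) : Decidable (Spec_duplicate_array x out) := by unfold Spec_duplicate_array; infer_instance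

-- ===== CLAIM (what is proved, stated in full; the proofs are below) =====
def Claim_equal_duplicate_array : Prop := ∀ (x : List Int), Dom_duplicate_array x → Spec_duplicate_array x (duplicate_array x)

-- ===== LEMMAS AND PROOFS =====

/-- "o is the minimum value occurring more than once in x (none if there is no duplicate)". -/
def IsMinDup (x : List Int) (o : Option Int) : Prop :=
  match o with
  | none => ∀ v : Int, x.count v ≤ 1
  | some m => 1 < x.count m ∧ ∀ v : Int, 1 < x.count v → m ≤ v

theorem minDup_unique (x : List Int) (o o' : Option Int)
    (h : IsMinDup x o) (h' : IsMinDup x o') : o = o' := by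
  cases o with
  | none =>
    cases o' with
    | none => rfl
    | some m => exact absurd h'.1 (not_lt.mpr (h m))
  | some m =>
    cases o' with
    | none => exact absurd h.1 (not_lt.mpr (h' m))
    | some m' => exact congrArg some (le_antisymm (h.2 m' h'.1) (h'.2 m h.1))

theorem count_snoc_self (p : List Int) (i : Int) :
    (p ++ [i]).count i = p.count i + 1 := by
  simp

theorem count_snoc_ne (p : List Int) (i v : Int) (h : v ≠ i) :
    (p ++ [i]).count v = p.count v := by
  simp [List.count_append, Ne.symm h]

theorem a_char (x : List Int) : IsMinDup x (duplicate_array x) := by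
  have hstep : x.foldl
      (fun d i => if d.contains i then d.modify i 0 (· + 1) else d.insert i 1)
      (PySem.Dict.empty : PySem.Dict Int Int) = PySem.Dict.counter x := by
    rw [PySem.Dict.counter_eq_foldl]
    apply List.foldl_ext
    intro d i _
    by_cases h : d.contains i
    · simp [h]
    · have hg : d.getD i 0 = 0 :=
        PySem.Dict.getD_of_not_contains d 0 (by revert h; cases d.contains i <;> simp)
      simp [h, PySem.Dict.modify, hg]
  have hdup : (((PySem.Dict.counter x).items.filter (fun p => p.2 > 1)).map Prod.fst)
      = (PySem.Set.ofList x).filter (fun k => decide (1 < x.count k)) := by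
    rw [PySem.Dict.items_counter, List.filter_map, List.map_map]
    have hpred : ((fun p : Int × Int => decide (p.2 > 1)) ∘ (fun k : Int => (k, (x.count k : Int))))
        = fun k : Int => decide (1 < x.count k) := by
      funext k; simp
    rw [hpred]
    simp [Function.comp_def]
  simp only [duplicate_array, hstep, hdup]
  set L := (PySem.Set.ofList x).filter (fun k => decide (1 < x.count k)) with hL
  have memL : ∀ v : Int, v ∈ L ↔ 1 < x.count v := by
    intro v
    constructor
    · intro hv
      have := List.of_mem_filter hv
      simpa using this
    · intro hv
      apply List.mem_filter.mpr
      refine ⟨(PySem.Set.mem_ofList _ _).mpr ?_, by simpa using hv⟩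
      exact List.count_pos_iff.mp (by omega)
  by_cases hLe : L = []
  · simp only [hLe, List.isEmpty_nil, if_true]
    intro v
    by_contra hv
    rw [not_le] at hv
    have : v ∈ L := (memL v).mpr hv
    simp [hLe] at this
  · rw [if_neg (by simpa [List.isEmpty_iff] using hLe)]
    obtain ⟨m, hm⟩ : ∃ m, PySem.List.min? L (fun v => v) = some m := by
      cases h : PySem.List.min? L (fun v => v) with
      | none => exact absurd ((PySem.List.min?_eq_none_iff L _).mp h) hLe
      | some m => exact ⟨m, rfl⟩
    rw [hm]
    refine ⟨(memL m).mp (PySem.List.min?_mem hm), ?_⟩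
    intro v hv
    exact PySem.List.min?_isMin hm v ((memL v).mpr hv)

/-- The updated running minimum when a duplicate i is seen (the match in duplicate_array_alt). -/
def newBest (best : Option Int) (i : Int) : Option Int :=
  match best with
  | none => some i
  | some b => if i < b then some i else some b

theorem minDup_snoc_mem (p : List Int) (i : Int) (best : Option Int)
    (hi : i ∈ p) (h : IsMinDup p best) :
    IsMinDup (p ++ [i]) (newBest best i) := by
  have hip : 0 < p.count i := List.count_pos_iff.mpr hi
  cases best with
  | none =>
    simp only [newBest, IsMinDup]
    refine ⟨?_, ?_⟩
    · rw [count_snoc_self]; omega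
    · intro v hv
      by_cases hvi : v = i
      · exact le_of_eq hvi.symm
      · rw [count_snoc_ne p i v hvi] at hv
        exact absurd hv (not_lt.mpr (h v))
  | some b =>
    obtain ⟨hb, hmin⟩ := h
    by_cases hib : i < b <;> simp only [newBest, hib, if_true, if_false, IsMinDup]
    · refine ⟨?_, ?_⟩
      · rw [count_snoc_self]; omega
      · intro v hv
        by_cases hvi : v = i
        · exact le_of_eq hvi.symm
        · rw [count_snoc_ne p i v hvi] at hv
          exact le_of_lt (lt_of_lt_of_le hib (hmin v hv))
    · refine ⟨?_, ?_⟩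
      · by_cases hbi : b = i
        · subst hbi; rw [count_snoc_self]; omega
        · rw [count_snoc_ne p i b hbi]; exact hb
      · intro v hv
        by_cases hvi : v = i
        · exact hvi ▸ not_lt.mp hib
        · rw [count_snoc_ne p i v hvi] at hv
          exact hmin v hv

theorem minDup_snoc_not_mem (p : List Int) (i : Int) (best : Option Int)
    (hi : i ∉ p) (h : IsMinDup p best) : IsMinDup (p ++ [i]) best := by
  have hip : p.count i = 0 := List.count_eq_zero.mpr hi
  cases best with
  | none =>
    simp only [IsMinDup]
    intro v
    by_cases hvi : v = i
    · subst hvi; rw [count_snoc_self]; omega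
    · rw [count_snoc_ne p i v hvi]; exact h v
  | some b =>
    obtain ⟨hb, hmin⟩ := h
    simp only [IsMinDup]
    refine ⟨?_, ?_⟩
    · by_cases hbi : b = i
      · subst hbi; omega
      · rw [count_snoc_ne p i b hbi]; exact hb
    · intro v hv
      by_cases hvi : v = i
      · subst hvi; rw [count_snoc_self] at hv; omega
      · rw [count_snoc_ne p i v hvi] at hv
        exact hmin v hv

/-- The loop body of duplicate_array_alt, named for the proofs (definitionally equal to the
    lambda in the port). -/
def bStep (st : PySem.Set Int × Option Int) (i : Int) : PySem.Set Int × Option Int :=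
  if PySem.Set.contains st.1 i then
    (st.1, match st.2 with
           | none => some i
           | some b => if i < b then some i else some b)
  else (PySem.Set.add st.1 i, st.2)

theorem b_inv (l : List Int) : ∀ (p : List Int) (best : Option Int),
    IsMinDup p best →
    (l.foldl bStep (PySem.Set.ofList p, best)).1 = PySem.Set.ofList (p ++ l) ∧
    IsMinDup (p ++ l) (l.foldl bStep (PySem.Set.ofList p, best)).2 := by
  induction l with
  | nil =>
    intro p best h
    refine ⟨by simp, ?_⟩
    simpa using h
  | cons i l ih =>
    intro p best h
    rw [List.foldl_cons, show p ++ i :: l = (p ++ [i]) ++ l from by simp]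
    by_cases hm : i ∈ p
    · have hmem : i ∈ PySem.Set.ofList p := (PySem.Set.mem_ofList _ _).mpr hm
      have hc : PySem.Set.contains (PySem.Set.ofList p) i = true :=
        (PySem.Set.contains_iff _ _).mpr hmem
      have hset : PySem.Set.ofList (p ++ [i]) = PySem.Set.ofList p := by
        rw [PySem.Set.ofList_append_singleton, PySem.Set.add_of_mem hmem]
      have hred : bStep (PySem.Set.ofList p, best) i
          = (PySem.Set.ofList p, newBest best i) := by
        unfold bStep
        rw [if_pos hc]
        rfl
      rw [hred]
      have hstep := ih (p ++ [i]) (newBest best i) (minDup_snoc_mem p i best hm h)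
      rw [hset] at hstep
      exact hstep
    · have hmem : i ∉ PySem.Set.ofList p := fun hx => hm ((PySem.Set.mem_ofList _ _).mp hx)
      have hc : PySem.Set.contains (PySem.Set.ofList p) i = false := by
        have : ¬ (PySem.Set.contains (PySem.Set.ofList p) i = true) := fun hx =>
          hmem ((PySem.Set.contains_iff _ _).mp hx)
        revert this; cases PySem.Set.contains (PySem.Set.ofList p) i <;> simp
      have hset : PySem.Set.ofList (p ++ [i]) = PySem.Set.add (PySem.Set.ofList p) i :=
        PySem.Set.ofList_append_singleton p i
      have hred : bStep (PySem.Set.ofList p, best) i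
          = (PySem.Set.add (PySem.Set.ofList p) i, best) := by
        unfold bStep
        rw [if_neg (by rw [hc]; simp)]
      rw [hred]
      have hstep := ih (p ++ [i]) best (minDup_snoc_not_mem p i best hm h)
      rw [hset] at hstep
      exact hstep

theorem b_char (x : List Int) : IsMinDup x (duplicate_array_alt x) := by
  have halt : duplicate_array_alt x = (x.foldl bStep (PySem.Set.ofList [], none)).2 := rfl
  rw [halt]
  have h := (b_inv x [] none (by intro v; simp)).2
  simpa using h

-- ===== VERDICT (by name: the statement is the Claim_ definition above) =====
theorem duplicate_array_spec : Claim_equal_duplicate_array := by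
  intro x _
  exact minDup_unique x (duplicate_array x) (duplicate_array_alt x) (a_char x) (b_char x)
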